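-- pv_equiv track=rewrite | github.com/jonnyvector/adaptapedia | backend/users/username_service.py | is_temp_username
-- ===== SOURCE A (Python) =====
-- def is_temp_username(username: str) -> bool:
--     """
--     Check if a username is a temporary social auth username.
--
--     Args:
--         username: Username to check
--
--     Returns:
--         True if username matches temp pattern (provider_hash)
--     """
--     valid_providers = ['google', 'facebook', 'github', 'twitter']
--
--     for provider in valid_providers:
--         if username.startswith(f"{provider}_"):
--             # Check if the part after provider_ looks like a hash
--             suffix = username[len(provider) + 1:]
--             # Temp usernames should have 8+ hex characters or hex + digits
--             if len(suffix) >= 8 and all(c in '0123456789abcdef' for c in suffix[:8]):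
--                 return True
--
--     return False
-- ===== SOURCE B (Python) =====
-- # B: compile the temp-username patterns once into a table-driven DFA (a trie of the
-- # provider-prefix patterns), then match with a single char-at-a-time scan.
-- _PATTERNS = ('google_', 'facebook_', 'github_', 'twitter_')
--
--
-- def _compile():
--     trans = {}
--     accept = set()
--     n = 1
--     for w in _PATTERNS:
--         s = 0
--         for c in w:
--             t = trans.get((s, c))
--             if t is None:
--                 t = n
--                 n += 1
--                 trans[(s, c)] = t
--             s = t
--         accept.add(s)
--     return trans, accept
--
--
-- _TRANS, _ACCEPT = _compile()
-- _HEX = frozenset('0123456789abcdef')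
--
--
-- def is_temp_username(username: str) -> bool:
--     s = 0
--     i = 0
--     while s not in _ACCEPT:
--         if i == len(username):
--             return False
--         s = _TRANS.get((s, username[i]))
--         if s is None:
--             return False
--         i += 1
--     tail = username[i:i + 8]
--     return len(tail) == 8 and all(c in _HEX for c in tail)
-- ===== Notes on version B (the rewrite author's own statement) =====
-- stated objective: alternative
-- what changed: Replaces the per-provider startswith loop with manual slicing by a DFA: the four provider-prefix patterns are compiled once into a trie transition table and matching is a single char-at-a-time scan that then checks 8 hex characters.
import Mathlib
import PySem

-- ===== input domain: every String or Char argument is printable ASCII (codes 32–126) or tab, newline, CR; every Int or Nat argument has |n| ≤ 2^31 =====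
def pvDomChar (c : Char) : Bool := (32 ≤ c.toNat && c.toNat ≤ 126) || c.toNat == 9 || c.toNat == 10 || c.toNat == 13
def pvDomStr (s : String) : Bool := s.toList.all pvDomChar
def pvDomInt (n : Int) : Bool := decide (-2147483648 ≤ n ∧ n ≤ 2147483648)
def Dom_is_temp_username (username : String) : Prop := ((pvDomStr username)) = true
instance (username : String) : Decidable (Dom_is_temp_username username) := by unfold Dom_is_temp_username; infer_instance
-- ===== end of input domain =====

-- B compiles the four provider-prefix patterns once into a table-driven DFA (a trie as a
-- transition table) and matches with a single char-at-a-time scan (alternative; same value).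

-- ===== PORT A =====
-- 'c in "0123456789abcdef"' for a single character c is exactly list membership of that char
def pvHexCharsA : List Char := "0123456789abcdef".toList

-- the for-loop over valid_providers, with its early 'return True'
def pvLoopA : List (List Char) → List Char → Bool
  | [], _ => false
  | p :: rest, cs =>
    if PySem.Chars.startswith cs (p ++ ['_']) then
      -- suffix = username[len(provider) + 1:]
      let suffix := PySem.List.slice cs (some ((p.length : Int) + 1)) none
      -- len(suffix) >= 8 and all(c in '0123456789abcdef' for c in suffix[:8])
      if 8 ≤ suffix.length && (PySem.List.slice suffix none (some (8 : Int))).all (fun c => c ∈ pvHexCharsA) then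
        true
      else pvLoopA rest cs
    else pvLoopA rest cs

def is_temp_username (username : String) : Bool :=
  pvLoopA ["google".toList, "facebook".toList, "github".toList, "twitter".toList] username.toList

-- ===== PORT B =====
-- _PATTERNS
def pvPatternsB : List (List Char) :=
  ["google_".toList, "facebook_".toList, "github_".toList, "twitter_".toList]

-- _compile(): the two nested for-loops building the transition dict and accept set;
-- the loop state (trans, accept, n) / inner (trans, n, s) is carried as a tuple
def pvCompileB : PySem.Dict (Nat × Char) Nat × PySem.Set Nat :=
  let st := pvPatternsB.foldl
    (fun (acc : PySem.Dict (Nat × Char) Nat × PySem.Set Nat × Nat) w =>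
      let step := w.foldl
        (fun (st2 : PySem.Dict (Nat × Char) Nat × Nat × Nat) c =>
          match st2.1.get? (st2.2.2, c) with
          | none => (st2.1.insert (st2.2.2, c) st2.2.1, st2.2.1 + 1, st2.2.1)
          | some t => (st2.1, st2.2.1, t))
        (acc.1, acc.2.2, 0)
      (step.1, acc.2.1.add step.2.2, step.2.1))
    (PySem.Dict.empty, PySem.Set.empty, 1)
  (st.1, st.2.1)

def pvTransB : PySem.Dict (Nat × Char) Nat := pvCompileB.1
def pvAcceptB : PySem.Set Nat := pvCompileB.2
-- _HEX = frozenset('0123456789abcdef')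
def pvHexSetB : PySem.Set Char := PySem.Set.ofList "0123456789abcdef".toList

-- the while loop of is_temp_username: state s, and the characters not yet consumed
-- (cs = username[i:], so tail = username[i:i+8] is cs.take 8)
def pvRunB (s : Nat) (cs : List Char) : Bool :=
  if pvAcceptB.contains s then
    let tail := cs.take 8
    decide (tail.length = 8) && tail.all (fun c => pvHexSetB.contains c)
  else
    match cs with
    | [] => false
    | c :: rest =>
      match pvTransB.get? (s, c) with
      | none => false
      | some t => pvRunB t rest
termination_by cs.length
decreasing_by simp_wf

def is_temp_username_alt (username : String) : Bool := pvRunB 0 username.toList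

-- ===== PRECONDITION & SPEC =====
def Spec_is_temp_username (username : String) (out : Bool) : Prop := out = is_temp_username_alt username
instance (username : String) (out : Bool) : Decidable (Spec_is_temp_username username out) := by unfold Spec_is_temp_username; infer_instance

-- ===== CLAIM =====
def Claim_equal_is_temp_username : Prop := ∀ (username : String), Dom_is_temp_username username → Spec_is_temp_username username (is_temp_username username)

-- ===== LEMMAS AND PROOFS =====

-- the compiled automaton, evaluated once: 30 transitions, the four pattern-end states accept
theorem pvTransB_lit : pvTransB = PySem.Dict.mk [((0,'g'),1), ((1,'o'),2), ((2,'o'),3), ((3,'g'),4), ((4,'l'),5), ((5,'e'),6), ((6,'_'),7), ((0,'f'),8), ((8,'a'),9), ((9,'c'),10), ((10,'e'),11), ((11,'b'),12), ((12,'o'),13), ((13,'o'),14), ((14,'k'),15), ((15,'_'),16), ((1,'i'),17), ((17,'t'),18), ((18,'h'),19), ((19,'u'),20), ((20,'b'),21), ((21,'_'),22), ((0,'t'),23), ((23,'w'),24), ((24,'i'),25), ((25,'t'),26), ((26,'t'),27), ((27,'e'),28), ((28,'r'),29), ((29,'_'),30)] := by decide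

-- A's hex test on a suffix, the common reference form for both sides
def pvHexOk (t : List Char) : Bool := decide (8 ≤ t.length) && (t.take 8).all (fun c => c ∈ pvHexCharsA)

-- at an accepting state, B's remaining check is exactly pvHexOk of the unconsumed characters
theorem pvRunAccept (s : Nat) (hacc : pvAcceptB.contains s = true) :
    ∀ cs, pvRunB s cs = pvHexOk cs := by
  intro cs
  rw [pvRunB.eq_def, hacc]
  simp only [if_true, pvHexOk]
  by_cases h : 8 ≤ cs.length <;>
    simp [List.length_take, h, pvHexSetB, pvHexCharsA, PySem.Set.mem_ofList]

-- one step along a single-exit chain state of the trie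
theorem pvChainStep (s t : Nat) (c0 : Char) (rem : List Char)
    (hacc : pvAcceptB.contains s = false)
    (htr : ∀ c, pvTransB.get? (s, c) = if c = c0 then some t else none)
    (ih : ∀ cs, pvRunB t cs = (decide (rem <+: cs) && pvHexOk (cs.drop rem.length))) :
    ∀ cs, pvRunB s cs = (decide ((c0 :: rem) <+: cs) && pvHexOk (cs.drop (rem.length + 1))) := by
  intro cs
  cases cs with
  | nil => rw [pvRunB.eq_def, hacc]; simp
  | cons c rest =>
    have hstep : pvRunB s (c :: rest) = (match pvTransB.get? (s, c) with
      | none => false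
      | some t => pvRunB t rest) := by
      rw [pvRunB.eq_def, hacc]; simp
    rw [hstep, htr]
    by_cases h : c = c0
    · subst h
      simp [ih rest, List.cons_prefix_cons]
    · simp [h, List.cons_prefix_cons, Ne.symm h]
theorem pvHtr2 : ∀ c, pvTransB.get? (2, c) = if c = 'o' then some 3 else none := by
  intro c
  by_cases h : c = 'o'
  · simp [pvTransB_lit, PySem.Dict.get?, h]
  · simp [pvTransB_lit, PySem.Dict.get?, h, Ne.symm h]

theorem pvHtr3 : ∀ c, pvTransB.get? (3, c) = if c = 'g' then some 4 else none := by
  intro c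
  by_cases h : c = 'g'
  · simp [pvTransB_lit, PySem.Dict.get?, h]
  · simp [pvTransB_lit, PySem.Dict.get?, h, Ne.symm h]

theorem pvHtr4 : ∀ c, pvTransB.get? (4, c) = if c = 'l' then some 5 else none := by
  intro c
  by_cases h : c = 'l'
  · simp [pvTransB_lit, PySem.Dict.get?, h]
  · simp [pvTransB_lit, PySem.Dict.get?, h, Ne.symm h]

theorem pvHtr5 : ∀ c, pvTransB.get? (5, c) = if c = 'e' then some 6 else none := by
  intro c
  by_cases h : c = 'e'
  · simp [pvTransB_lit, PySem.Dict.get?, h]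
  · simp [pvTransB_lit, PySem.Dict.get?, h, Ne.symm h]

theorem pvHtr6 : ∀ c, pvTransB.get? (6, c) = if c = '_' then some 7 else none := by
  intro c
  by_cases h : c = '_'
  · simp [pvTransB_lit, PySem.Dict.get?, h]
  · simp [pvTransB_lit, PySem.Dict.get?, h, Ne.symm h]

theorem pvHtr8 : ∀ c, pvTransB.get? (8, c) = if c = 'a' then some 9 else none := by
  intro c
  by_cases h : c = 'a'
  · simp [pvTransB_lit, PySem.Dict.get?, h]
  · simp [pvTransB_lit, PySem.Dict.get?, h, Ne.symm h]

theorem pvHtr9 : ∀ c, pvTransB.get? (9, c) = if c = 'c' then some 10 else none := by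
  intro c
  by_cases h : c = 'c'
  · simp [pvTransB_lit, PySem.Dict.get?, h]
  · simp [pvTransB_lit, PySem.Dict.get?, h, Ne.symm h]

theorem pvHtr10 : ∀ c, pvTransB.get? (10, c) = if c = 'e' then some 11 else none := by
  intro c
  by_cases h : c = 'e'
  · simp [pvTransB_lit, PySem.Dict.get?, h]
  · simp [pvTransB_lit, PySem.Dict.get?, h, Ne.symm h]

theorem pvHtr11 : ∀ c, pvTransB.get? (11, c) = if c = 'b' then some 12 else none := by
  intro c
  by_cases h : c = 'b'
  · simp [pvTransB_lit, PySem.Dict.get?, h]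
  · simp [pvTransB_lit, PySem.Dict.get?, h, Ne.symm h]

theorem pvHtr12 : ∀ c, pvTransB.get? (12, c) = if c = 'o' then some 13 else none := by
  intro c
  by_cases h : c = 'o'
  · simp [pvTransB_lit, PySem.Dict.get?, h]
  · simp [pvTransB_lit, PySem.Dict.get?, h, Ne.symm h]

theorem pvHtr13 : ∀ c, pvTransB.get? (13, c) = if c = 'o' then some 14 else none := by
  intro c
  by_cases h : c = 'o'
  · simp [pvTransB_lit, PySem.Dict.get?, h]
  · simp [pvTransB_lit, PySem.Dict.get?, h, Ne.symm h]

theorem pvHtr14 : ∀ c, pvTransB.get? (14, c) = if c = 'k' then some 15 else none := by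
  intro c
  by_cases h : c = 'k'
  · simp [pvTransB_lit, PySem.Dict.get?, h]
  · simp [pvTransB_lit, PySem.Dict.get?, h, Ne.symm h]

theorem pvHtr15 : ∀ c, pvTransB.get? (15, c) = if c = '_' then some 16 else none := by
  intro c
  by_cases h : c = '_'
  · simp [pvTransB_lit, PySem.Dict.get?, h]
  · simp [pvTransB_lit, PySem.Dict.get?, h, Ne.symm h]

theorem pvHtr17 : ∀ c, pvTransB.get? (17, c) = if c = 't' then some 18 else none := by
  intro c
  by_cases h : c = 't'
  · simp [pvTransB_lit, PySem.Dict.get?, h]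
  · simp [pvTransB_lit, PySem.Dict.get?, h, Ne.symm h]

theorem pvHtr18 : ∀ c, pvTransB.get? (18, c) = if c = 'h' then some 19 else none := by
  intro c
  by_cases h : c = 'h'
  · simp [pvTransB_lit, PySem.Dict.get?, h]
  · simp [pvTransB_lit, PySem.Dict.get?, h, Ne.symm h]

theorem pvHtr19 : ∀ c, pvTransB.get? (19, c) = if c = 'u' then some 20 else none := by
  intro c
  by_cases h : c = 'u'
  · simp [pvTransB_lit, PySem.Dict.get?, h]
  · simp [pvTransB_lit, PySem.Dict.get?, h, Ne.symm h]

theorem pvHtr20 : ∀ c, pvTransB.get? (20, c) = if c = 'b' then some 21 else none := by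
  intro c
  by_cases h : c = 'b'
  · simp [pvTransB_lit, PySem.Dict.get?, h]
  · simp [pvTransB_lit, PySem.Dict.get?, h, Ne.symm h]

theorem pvHtr21 : ∀ c, pvTransB.get? (21, c) = if c = '_' then some 22 else none := by
  intro c
  by_cases h : c = '_'
  · simp [pvTransB_lit, PySem.Dict.get?, h]
  · simp [pvTransB_lit, PySem.Dict.get?, h, Ne.symm h]

theorem pvHtr23 : ∀ c, pvTransB.get? (23, c) = if c = 'w' then some 24 else none := by
  intro c
  by_cases h : c = 'w'
  · simp [pvTransB_lit, PySem.Dict.get?, h]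
  · simp [pvTransB_lit, PySem.Dict.get?, h, Ne.symm h]

theorem pvHtr24 : ∀ c, pvTransB.get? (24, c) = if c = 'i' then some 25 else none := by
  intro c
  by_cases h : c = 'i'
  · simp [pvTransB_lit, PySem.Dict.get?, h]
  · simp [pvTransB_lit, PySem.Dict.get?, h, Ne.symm h]

theorem pvHtr25 : ∀ c, pvTransB.get? (25, c) = if c = 't' then some 26 else none := by
  intro c
  by_cases h : c = 't'
  · simp [pvTransB_lit, PySem.Dict.get?, h]
  · simp [pvTransB_lit, PySem.Dict.get?, h, Ne.symm h]

theorem pvHtr26 : ∀ c, pvTransB.get? (26, c) = if c = 't' then some 27 else none := by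
  intro c
  by_cases h : c = 't'
  · simp [pvTransB_lit, PySem.Dict.get?, h]
  · simp [pvTransB_lit, PySem.Dict.get?, h, Ne.symm h]

theorem pvHtr27 : ∀ c, pvTransB.get? (27, c) = if c = 'e' then some 28 else none := by
  intro c
  by_cases h : c = 'e'
  · simp [pvTransB_lit, PySem.Dict.get?, h]
  · simp [pvTransB_lit, PySem.Dict.get?, h, Ne.symm h]

theorem pvHtr28 : ∀ c, pvTransB.get? (28, c) = if c = 'r' then some 29 else none := by
  intro c
  by_cases h : c = 'r'
  · simp [pvTransB_lit, PySem.Dict.get?, h]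
  · simp [pvTransB_lit, PySem.Dict.get?, h, Ne.symm h]

theorem pvHtr29 : ∀ c, pvTransB.get? (29, c) = if c = '_' then some 30 else none := by
  intro c
  by_cases h : c = '_'
  · simp [pvTransB_lit, PySem.Dict.get?, h]
  · simp [pvTransB_lit, PySem.Dict.get?, h, Ne.symm h]

theorem pvRunL7 : ∀ cs, pvRunB 7 cs = (decide (([] : List Char) <+: cs) && pvHexOk (cs.drop 0)) := by
  simpa using pvRunAccept 7 (by decide)

theorem pvRunL16 : ∀ cs, pvRunB 16 cs = (decide (([] : List Char) <+: cs) && pvHexOk (cs.drop 0)) := by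
  simpa using pvRunAccept 16 (by decide)

theorem pvRunL22 : ∀ cs, pvRunB 22 cs = (decide (([] : List Char) <+: cs) && pvHexOk (cs.drop 0)) := by
  simpa using pvRunAccept 22 (by decide)

theorem pvRunL30 : ∀ cs, pvRunB 30 cs = (decide (([] : List Char) <+: cs) && pvHexOk (cs.drop 0)) := by
  simpa using pvRunAccept 30 (by decide)

theorem pvRunL29 : ∀ cs, pvRunB 29 cs = (decide ((['_'] : List Char) <+: cs) && pvHexOk (cs.drop 1)) := by
  have h := pvChainStep 29 30 '_' ([] : List Char) (by decide) pvHtr29 pvRunL30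
  intro cs; simpa using h cs

theorem pvRunL28 : ∀ cs, pvRunB 28 cs = (decide ((['r', '_'] : List Char) <+: cs) && pvHexOk (cs.drop 2)) := by
  have h := pvChainStep 28 29 'r' (['_'] : List Char) (by decide) pvHtr28 pvRunL29
  intro cs; simpa using h cs

theorem pvRunL27 : ∀ cs, pvRunB 27 cs = (decide ((['e', 'r', '_'] : List Char) <+: cs) && pvHexOk (cs.drop 3)) := by
  have h := pvChainStep 27 28 'e' (['r', '_'] : List Char) (by decide) pvHtr27 pvRunL28
  intro cs; simpa using h cs

theorem pvRunL26 : ∀ cs, pvRunB 26 cs = (decide ((['t', 'e', 'r', '_'] : List Char) <+: cs) && pvHexOk (cs.drop 4)) := by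
  have h := pvChainStep 26 27 't' (['e', 'r', '_'] : List Char) (by decide) pvHtr26 pvRunL27
  intro cs; simpa using h cs

theorem pvRunL25 : ∀ cs, pvRunB 25 cs = (decide ((['t', 't', 'e', 'r', '_'] : List Char) <+: cs) && pvHexOk (cs.drop 5)) := by
  have h := pvChainStep 25 26 't' (['t', 'e', 'r', '_'] : List Char) (by decide) pvHtr25 pvRunL26
  intro cs; simpa using h cs

theorem pvRunL24 : ∀ cs, pvRunB 24 cs = (decide ((['i', 't', 't', 'e', 'r', '_'] : List Char) <+: cs) && pvHexOk (cs.drop 6)) := by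
  have h := pvChainStep 24 25 'i' (['t', 't', 'e', 'r', '_'] : List Char) (by decide) pvHtr24 pvRunL25
  intro cs; simpa using h cs

theorem pvRunL23 : ∀ cs, pvRunB 23 cs = (decide ((['w', 'i', 't', 't', 'e', 'r', '_'] : List Char) <+: cs) && pvHexOk (cs.drop 7)) := by
  have h := pvChainStep 23 24 'w' (['i', 't', 't', 'e', 'r', '_'] : List Char) (by decide) pvHtr23 pvRunL24
  intro cs; simpa using h cs

theorem pvRunL21 : ∀ cs, pvRunB 21 cs = (decide ((['_'] : List Char) <+: cs) && pvHexOk (cs.drop 1)) := by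
  have h := pvChainStep 21 22 '_' ([] : List Char) (by decide) pvHtr21 pvRunL22
  intro cs; simpa using h cs

theorem pvRunL20 : ∀ cs, pvRunB 20 cs = (decide ((['b', '_'] : List Char) <+: cs) && pvHexOk (cs.drop 2)) := by
  have h := pvChainStep 20 21 'b' (['_'] : List Char) (by decide) pvHtr20 pvRunL21
  intro cs; simpa using h cs

theorem pvRunL19 : ∀ cs, pvRunB 19 cs = (decide ((['u', 'b', '_'] : List Char) <+: cs) && pvHexOk (cs.drop 3)) := by
  have h := pvChainStep 19 20 'u' (['b', '_'] : List Char) (by decide) pvHtr19 pvRunL20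
  intro cs; simpa using h cs

theorem pvRunL18 : ∀ cs, pvRunB 18 cs = (decide ((['h', 'u', 'b', '_'] : List Char) <+: cs) && pvHexOk (cs.drop 4)) := by
  have h := pvChainStep 18 19 'h' (['u', 'b', '_'] : List Char) (by decide) pvHtr18 pvRunL19
  intro cs; simpa using h cs

theorem pvRunL17 : ∀ cs, pvRunB 17 cs = (decide ((['t', 'h', 'u', 'b', '_'] : List Char) <+: cs) && pvHexOk (cs.drop 5)) := by
  have h := pvChainStep 17 18 't' (['h', 'u', 'b', '_'] : List Char) (by decide) pvHtr17 pvRunL18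
  intro cs; simpa using h cs

theorem pvRunL15 : ∀ cs, pvRunB 15 cs = (decide ((['_'] : List Char) <+: cs) && pvHexOk (cs.drop 1)) := by
  have h := pvChainStep 15 16 '_' ([] : List Char) (by decide) pvHtr15 pvRunL16
  intro cs; simpa using h cs

theorem pvRunL14 : ∀ cs, pvRunB 14 cs = (decide ((['k', '_'] : List Char) <+: cs) && pvHexOk (cs.drop 2)) := by
  have h := pvChainStep 14 15 'k' (['_'] : List Char) (by decide) pvHtr14 pvRunL15
  intro cs; simpa using h cs

theorem pvRunL13 : ∀ cs, pvRunB 13 cs = (decide ((['o', 'k', '_'] : List Char) <+: cs) && pvHexOk (cs.drop 3)) := by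
  have h := pvChainStep 13 14 'o' (['k', '_'] : List Char) (by decide) pvHtr13 pvRunL14
  intro cs; simpa using h cs

theorem pvRunL12 : ∀ cs, pvRunB 12 cs = (decide ((['o', 'o', 'k', '_'] : List Char) <+: cs) && pvHexOk (cs.drop 4)) := by
  have h := pvChainStep 12 13 'o' (['o', 'k', '_'] : List Char) (by decide) pvHtr12 pvRunL13
  intro cs; simpa using h cs

theorem pvRunL11 : ∀ cs, pvRunB 11 cs = (decide ((['b', 'o', 'o', 'k', '_'] : List Char) <+: cs) && pvHexOk (cs.drop 5)) := by
  have h := pvChainStep 11 12 'b' (['o', 'o', 'k', '_'] : List Char) (by decide) pvHtr11 pvRunL12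
  intro cs; simpa using h cs

theorem pvRunL10 : ∀ cs, pvRunB 10 cs = (decide ((['e', 'b', 'o', 'o', 'k', '_'] : List Char) <+: cs) && pvHexOk (cs.drop 6)) := by
  have h := pvChainStep 10 11 'e' (['b', 'o', 'o', 'k', '_'] : List Char) (by decide) pvHtr10 pvRunL11
  intro cs; simpa using h cs

theorem pvRunL9 : ∀ cs, pvRunB 9 cs = (decide ((['c', 'e', 'b', 'o', 'o', 'k', '_'] : List Char) <+: cs) && pvHexOk (cs.drop 7)) := by
  have h := pvChainStep 9 10 'c' (['e', 'b', 'o', 'o', 'k', '_'] : List Char) (by decide) pvHtr9 pvRunL10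
  intro cs; simpa using h cs

theorem pvRunL8 : ∀ cs, pvRunB 8 cs = (decide ((['a', 'c', 'e', 'b', 'o', 'o', 'k', '_'] : List Char) <+: cs) && pvHexOk (cs.drop 8)) := by
  have h := pvChainStep 8 9 'a' (['c', 'e', 'b', 'o', 'o', 'k', '_'] : List Char) (by decide) pvHtr8 pvRunL9
  intro cs; simpa using h cs

theorem pvRunL6 : ∀ cs, pvRunB 6 cs = (decide ((['_'] : List Char) <+: cs) && pvHexOk (cs.drop 1)) := by
  have h := pvChainStep 6 7 '_' ([] : List Char) (by decide) pvHtr6 pvRunL7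
  intro cs; simpa using h cs

theorem pvRunL5 : ∀ cs, pvRunB 5 cs = (decide ((['e', '_'] : List Char) <+: cs) && pvHexOk (cs.drop 2)) := by
  have h := pvChainStep 5 6 'e' (['_'] : List Char) (by decide) pvHtr5 pvRunL6
  intro cs; simpa using h cs

theorem pvRunL4 : ∀ cs, pvRunB 4 cs = (decide ((['l', 'e', '_'] : List Char) <+: cs) && pvHexOk (cs.drop 3)) := by
  have h := pvChainStep 4 5 'l' (['e', '_'] : List Char) (by decide) pvHtr4 pvRunL5
  intro cs; simpa using h cs

theorem pvRunL3 : ∀ cs, pvRunB 3 cs = (decide ((['g', 'l', 'e', '_'] : List Char) <+: cs) && pvHexOk (cs.drop 4)) := by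
  have h := pvChainStep 3 4 'g' (['l', 'e', '_'] : List Char) (by decide) pvHtr3 pvRunL4
  intro cs; simpa using h cs

theorem pvRunL2 : ∀ cs, pvRunB 2 cs = (decide ((['o', 'g', 'l', 'e', '_'] : List Char) <+: cs) && pvHexOk (cs.drop 5)) := by
  have h := pvChainStep 2 3 'o' (['g', 'l', 'e', '_'] : List Char) (by decide) pvHtr2 pvRunL3
  intro cs; simpa using h cs

-- the two branching states of the trie: state 1 (after 'g') and the start state 0
theorem pvHtr1 : ∀ c, pvTransB.get? (1, c) = if c = 'o' then some 2 else if c = 'i' then some 17 else none := by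
  intro c
  by_cases h1 : c = 'o'
  · simp [pvTransB_lit, PySem.Dict.get?, h1]
  · by_cases h2 : c = 'i'
    · simp [pvTransB_lit, PySem.Dict.get?, h2]
    · simp [pvTransB_lit, PySem.Dict.get?, h1, h2, Ne.symm h1, Ne.symm h2]

theorem pvRunL1 : ∀ cs, pvRunB 1 cs =
    ((decide ((['o','o','g','l','e','_'] : List Char) <+: cs) && pvHexOk (cs.drop 6)) ||
     (decide ((['i','t','h','u','b','_'] : List Char) <+: cs) && pvHexOk (cs.drop 6))) := by
  intro cs
  cases cs with
  | nil => rw [pvRunB.eq_def, show pvAcceptB.contains 1 = false by decide]; simp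
  | cons c rest =>
    have hstep : pvRunB 1 (c :: rest) = (match pvTransB.get? (1, c) with
      | none => false
      | some t => pvRunB t rest) := by
      rw [pvRunB.eq_def, show pvAcceptB.contains 1 = false by decide]; simp
    rw [hstep, pvHtr1]
    by_cases h1 : c = 'o'
    · subst h1
      simp [pvRunL2 rest, List.cons_prefix_cons]
    · by_cases h2 : c = 'i'
      · subst h2
        simp [pvRunL17 rest, List.cons_prefix_cons, h1]
      · simp [h1, h2, List.cons_prefix_cons, Ne.symm h1, Ne.symm h2]

theorem pvHtr0 : ∀ c, pvTransB.get? (0, c) = if c = 'g' then some 1 else if c = 'f' then some 8 else if c = 't' then some 23 else none := by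
  intro c
  by_cases h1 : c = 'g'
  · simp [pvTransB_lit, PySem.Dict.get?, h1]
  · by_cases h2 : c = 'f'
    · simp [pvTransB_lit, PySem.Dict.get?, h2]
    · by_cases h3 : c = 't'
      · simp [pvTransB_lit, PySem.Dict.get?, h3]
      · simp [pvTransB_lit, PySem.Dict.get?, h1, h2, h3, Ne.symm h1, Ne.symm h2, Ne.symm h3]

theorem pvRunL0 : ∀ cs, pvRunB 0 cs =
    ((decide ((['g','o','o','g','l','e','_'] : List Char) <+: cs) && pvHexOk (cs.drop 7)) ||
     (decide ((['g','i','t','h','u','b','_'] : List Char) <+: cs) && pvHexOk (cs.drop 7)) ||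
     (decide ((['f','a','c','e','b','o','o','k','_'] : List Char) <+: cs) && pvHexOk (cs.drop 9)) ||
     (decide ((['t','w','i','t','t','e','r','_'] : List Char) <+: cs) && pvHexOk (cs.drop 8))) := by
  intro cs
  cases cs with
  | nil => rw [pvRunB.eq_def, show pvAcceptB.contains 0 = false by decide]; simp
  | cons c rest =>
    have hstep : pvRunB 0 (c :: rest) = (match pvTransB.get? (0, c) with
      | none => false
      | some t => pvRunB t rest) := by
      rw [pvRunB.eq_def, show pvAcceptB.contains 0 = false by decide]; simp
    rw [hstep, pvHtr0]
    by_cases h1 : c = 'g'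
    · subst h1
      simp [pvRunL1 rest, List.cons_prefix_cons]
    · by_cases h2 : c = 'f'
      · subst h2
        simp [pvRunL8 rest, List.cons_prefix_cons, h1]
      · by_cases h3 : c = 't'
        · subst h3
          simp [pvRunL23 rest, List.cons_prefix_cons, h1, h2]
        · simp [h1, h2, h3, List.cons_prefix_cons,
            Ne.symm h1, Ne.symm h2, Ne.symm h3]

-- ===== A-side: the provider loop as an OR of the four pattern checks =====
theorem pvStartswithDecide (cs p : List Char) :
    PySem.Chars.startswith cs p = decide (p <+: cs) := by
  rw [Bool.eq_iff_iff]
  simp [PySem.Chars.startswith_iff]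

theorem pvIfOr (b c r : Bool) : (if b then (if c then true else r) else r) = ((b && c) || r) := by
  cases b <;> cases c <;> rfl

theorem pvHexTermEq (t : List Char) :
    ((decide (8 ≤ t.length) : Bool) && (PySem.List.slice t none (some (8 : Int))).all (fun c => c ∈ pvHexCharsA)) = pvHexOk t := by
  have hslice : PySem.List.slice t none (some (8 : Int)) = t.take 8 := by
    simpa using PySem.List.slice_to_natCast (xs := t) (b := 8)
  rw [pvHexOk, hslice]

theorem pvLoopA_or (cs : List Char) :
    pvLoopA ["google".toList, "facebook".toList, "github".toList, "twitter".toList] cs =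
    ((decide ((['g','o','o','g','l','e','_'] : List Char) <+: cs) && pvHexOk (cs.drop 7)) ||
     (decide ((['f','a','c','e','b','o','o','k','_'] : List Char) <+: cs) && pvHexOk (cs.drop 9)) ||
     (decide ((['g','i','t','h','u','b','_'] : List Char) <+: cs) && pvHexOk (cs.drop 7)) ||
     (decide ((['t','w','i','t','t','e','r','_'] : List Char) <+: cs) && pvHexOk (cs.drop 8))) := by
  rw [show "google".toList = (['g','o','o','g','l','e'] : List Char) from rfl,
      show "facebook".toList = (['f','a','c','e','b','o','o','k'] : List Char) from rfl,
      show "github".toList = (['g','i','t','h','u','b'] : List Char) from rfl,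
      show "twitter".toList = (['t','w','i','t','t','e','r'] : List Char) from rfl]
  simp only [pvLoopA, pvIfOr]
  norm_num
  simp only [pvStartswithDecide, pvHexTermEq, Bool.or_assoc]
  simp [PySem.List.slice_from]

-- reordering the four disjuncts (the middle two swap between A's and B's order)
theorem pvOrSwap (a b c d : Bool) : (a || b || c || d) = (a || c || b || d) := by
  cases b <;> cases c <;> simp

-- ===== VERDICT =====
theorem is_temp_username_spec : Claim_equal_is_temp_username := by
  intro username _
  show is_temp_username username = is_temp_username_alt username
  rw [is_temp_username, is_temp_username_alt, pvLoopA_or, pvRunL0]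
  exact pvOrSwap _ _ _ _
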